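-- pv_equiv track=rewrite | github.com/razaabbas05/2048-game | game_logic.py | get_curr_state
-- ===== SOURCE A (Python) =====
-- def get_curr_state(mat):
--     for i in range(4):
--         for j in range(4):
--             if mat[i][j]==2048:
--                 return "You won"
--
--     for i in range(4):
--         for j in range(4):
--             if mat[i][j] == 0:
--                 return "Game not over"
--
--     for i in range(3):
--         for j in range(3):
--             if mat[i][j]==mat[i][j+1] or mat[i][j]==mat[i+1][j]:
--                 return "Game not over"
--
--     for i in range(3):
--         if mat[i][3]==mat[i+1][3]:
--             return "Game not over"
--
--     for j in range(3):
--         if mat[3][j]==mat[3][j+1]: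
--             return "Game not over"
--
--     return "You lost"
-- ===== SOURCE B (Python) =====
-- def get_curr_state(mat):
--     has_2048 = has_empty = has_merge = False
--     for i in range(4):
--         for j in range(4):
--             v = mat[i][j]
--             has_2048 = has_2048 or v == 2048
--             has_empty = has_empty or v == 0
--             has_merge = (has_merge or (j < 3 and v == mat[i][j + 1])
--                          or (i < 3 and v == mat[i + 1][j]))
--     if has_2048:
--         return "You won"
--     if has_empty or has_merge:
--         return "Game not over"
--     return "You lost"
-- ===== Notes on version B (the rewrite author's own statement) =====
-- stated objective: alternative
-- what changed: Replaces A's five separate early-returning scans (win scan, empty scan, 3x3 interior merge scan, last-column scan, last-row scan) by a single uniform pass over the 16 cells that accumulates three flags (has_2048, has_empty, has_merge) and decides the result once at the end.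
-- outside the precondition, e.g. on get_curr_state([[2048, 0, 0, 0]]): A returns 'You won', B raises IndexError
import Mathlib
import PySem

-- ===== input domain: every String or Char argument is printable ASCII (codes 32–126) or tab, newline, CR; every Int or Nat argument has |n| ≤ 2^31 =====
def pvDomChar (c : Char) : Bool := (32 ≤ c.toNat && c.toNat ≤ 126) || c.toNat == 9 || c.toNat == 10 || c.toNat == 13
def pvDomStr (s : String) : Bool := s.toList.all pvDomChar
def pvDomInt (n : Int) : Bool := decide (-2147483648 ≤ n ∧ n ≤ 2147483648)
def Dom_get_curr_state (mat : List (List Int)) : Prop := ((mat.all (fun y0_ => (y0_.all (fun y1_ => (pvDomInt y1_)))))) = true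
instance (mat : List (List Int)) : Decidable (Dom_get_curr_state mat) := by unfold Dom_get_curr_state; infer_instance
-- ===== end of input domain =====

-- B replaces A's five early-returning scans by one pass over all 16 cells keeping three flags.
-- Shared helper: mat[i][j] (total form; Pre_ guarantees the indices are in range).
def pvCell (mat : List (List Int)) (i j : Int) : Int :=
  PySem.List.pyGetD (PySem.List.pyGetD mat i []) j 0

-- ===== PORT A =====
def get_curr_state (mat : List (List Int)) : String :=
  if (PySem.List.pyRange 0 4 1).any (fun i => (PySem.List.pyRange 0 4 1).any (fun j =>
        pvCell mat i j == 2048)) then "You won"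
  else if (PySem.List.pyRange 0 4 1).any (fun i => (PySem.List.pyRange 0 4 1).any (fun j =>
        pvCell mat i j == 0)) then "Game not over"
  else if (PySem.List.pyRange 0 3 1).any (fun i => (PySem.List.pyRange 0 3 1).any (fun j =>
        (pvCell mat i j == pvCell mat i (j+1)) || (pvCell mat i j == pvCell mat (i+1) j))) then "Game not over"
  else if (PySem.List.pyRange 0 3 1).any (fun i =>
        pvCell mat i 3 == pvCell mat (i+1) 3) then "Game not over"
  else if (PySem.List.pyRange 0 3 1).any (fun j =>
        pvCell mat 3 j == pvCell mat 3 (j+1)) then "Game not over"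
  else "You lost"

-- ===== PORT B =====
def get_curr_state_alt (mat : List (List Int)) : String :=
  let s : Bool × Bool × Bool :=
    (PySem.List.pyRange 0 4 1).foldl (fun st i =>
      (PySem.List.pyRange 0 4 1).foldl (fun st j =>
        let v := pvCell mat i j
        ( st.1 || (v == 2048),
          st.2.1 || (v == 0),
          st.2.2 || (decide (j < 3) && (v == pvCell mat i (j+1)))
                 || (decide (i < 3) && (v == pvCell mat (i+1) j)) )) st)
      (false, false, false)
  if s.1 then "You won"
  else if s.2.1 || s.2.2 then "Game not over"
  else "You lost"

-- ===== PRECONDITION & SPEC =====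
-- Pre_ excludes ragged boards (fewer than 4 rows, or one of the first 4 rows shorter than 4):
-- there A either raises IndexError or (if a 2048 precedes the first missing cell) returns early,
-- while B's single full scan raises.
def Pre_get_curr_state (mat : List (List Int)) : Prop :=
  4 ≤ mat.length ∧ ∀ r ∈ mat.take 4, 4 ≤ r.length
instance (mat : List (List Int)) : Decidable (Pre_get_curr_state mat) := by
  unfold Pre_get_curr_state; infer_instance
def pvWitness_get_curr_state : List (List Int) :=
  [[2, 4, 8, 16], [32, 64, 128, 256], [2, 4, 8, 16], [32, 64, 128, 256]]
def Spec_get_curr_state (mat : List (List Int)) (out : String) : Prop := out = get_curr_state_alt mat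
instance (mat : List (List Int)) (out : String) : Decidable (Spec_get_curr_state mat out) := by unfold Spec_get_curr_state; infer_instance

-- ===== CLAIM (what is proved, stated in full; the proofs are below) =====
def Claim_equal_get_curr_state : Prop := ∀ (mat : List (List Int)), Dom_get_curr_state mat → Pre_get_curr_state mat → Spec_get_curr_state mat (get_curr_state mat)

-- ===== LEMMAS AND PROOFS =====
theorem pv_if_if_or {c d : Prop} [Decidable c] [Decidable d] {x y : String} :
    (if c then x else if d then x else y) = (if c ∨ d then x else y) := by
  by_cases hc : c <;> by_cases hd : d <;> simp [hc, hd]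

set_option maxHeartbeats 2000000 in
theorem get_curr_state_spec : Claim_equal_get_curr_state := by
  intro mat _ hpre
  obtain ⟨hlen, hrows⟩ := hpre
  unfold Spec_get_curr_state
  rcases mat with _ | ⟨r0, _ | ⟨r1, _ | ⟨r2, _ | ⟨r3, rest⟩⟩⟩⟩ <;> simp at hlen
  have h0 : 4 ≤ r0.length := hrows r0 (by simp)
  have h1 : 4 ≤ r1.length := hrows r1 (by simp)
  have h2 : 4 ≤ r2.length := hrows r2 (by simp)
  have h3 : 4 ≤ r3.length := hrows r3 (by simp)
  rcases r0 with _|⟨a0,_|⟨a1,_|⟨a2,_|⟨a3,t0⟩⟩⟩⟩ <;> simp at h0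
  rcases r1 with _|⟨b0,_|⟨b1,_|⟨b2,_|⟨b3,t1⟩⟩⟩⟩ <;> simp at h1
  rcases r2 with _|⟨c0,_|⟨c1,_|⟨c2,_|⟨c3,t2⟩⟩⟩⟩ <;> simp at h2
  rcases r3 with _|⟨d0,_|⟨d1,_|⟨d2,_|⟨d3,t3⟩⟩⟩⟩ <;> simp at h3
  have hr4 : PySem.List.pyRange 0 4 1 = [0,1,2,3] := by decide
  have hr3 : PySem.List.pyRange 0 3 1 = [0,1,2] := by decide
  simp only [get_curr_state, get_curr_state_alt, hr4, hr3,
    List.any_cons, List.any_nil, List.foldl_cons, List.foldl_nil]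
  norm_num [pvCell, PySem.List.pyGetD_ofNat', List.getD_eq_getElem?_getD, List.getElem?_cons_zero, List.getElem?_cons_succ, Option.getD_some]
  rw [pv_if_if_or, pv_if_if_or, pv_if_if_or]
  exact if_congr (by simp only [or_comm, or_left_comm]) rfl (if_congr (by simp only [or_assoc, or_comm, or_left_comm]) rfl rfl)
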